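-- pv_equiv track=rewrite | github.com/awd1779/pi0 | scripts/list_available_objects.py | categorize_objects
-- ===== SOURCE A (Python) =====
-- def categorize_objects(objects):
--     """Categorize objects by type."""
--     categories = {
--         "utensils": [],
--         "fruits": [],
--         "vegetables": [],
--         "containers": [],
--         "cans": [],
--         "cubes": [],
--         "other": [],
--     }
--
--     utensil_keywords = ["fork", "knife", "spoon", "spatula", "ladle", "whisk"]
--     fruit_keywords = ["apple", "banana", "orange", "lemon", "lime", "peach", "pear", "mango", "kiwi", "grape"]
--     vegetable_keywords = ["carrot", "corn", "cucumber", "eggplant", "garlic", "onion", "pepper", "potato", "tomato", "broccoli"]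
--     container_keywords = ["bowl", "cup", "mug", "plate", "pot", "pan", "pitcher", "jar", "bottle"]
--     can_keywords = ["can", "coke", "pepsi", "sprite", "fanta", "redbull", "7up"]
--     cube_keywords = ["cube"]
--
--     for obj_id in objects:
--         obj_lower = obj_id.lower()
--
--         if any(kw in obj_lower for kw in utensil_keywords):
--             categories["utensils"].append(obj_id)
--         elif any(kw in obj_lower for kw in fruit_keywords):
--             categories["fruits"].append(obj_id)
--         elif any(kw in obj_lower for kw in vegetable_keywords):
--             categories["vegetables"].append(obj_id)
--         elif any(kw in obj_lower for kw in container_keywords):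
--             categories["containers"].append(obj_id)
--         elif any(kw in obj_lower for kw in can_keywords):
--             categories["cans"].append(obj_id)
--         elif any(kw in obj_lower for kw in cube_keywords):
--             categories["cubes"].append(obj_id)
--         else:
--             categories["other"].append(obj_id)
--
--     return categories
-- ===== SOURCE B (Python) =====
-- GROUPS = [
--     ("utensils", ["fork", "knife", "spoon", "spatula", "ladle", "whisk"]),
--     ("fruits", ["apple", "banana", "orange", "lemon", "lime", "peach", "pear", "mango", "kiwi", "grape"]),
--     ("vegetables", ["carrot", "corn", "cucumber", "eggplant", "garlic", "onion", "pepper", "potato", "tomato", "broccoli"]),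
--     ("containers", ["bowl", "cup", "mug", "plate", "pot", "pan", "pitcher", "jar", "bottle"]),
--     ("cans", ["can", "coke", "pepsi", "sprite", "fanta", "redbull", "7up"]),
--     ("cubes", ["cube"]),
-- ]
--
--
-- def _category(obj_id):
--     """Name of the first keyword group matching obj_id (case-insensitive), else 'other'."""
--     obj_lower = obj_id.lower()
--     for name, keywords in GROUPS:
--         if any(kw in obj_lower for kw in keywords):
--             return name
--     return "other"
--
--
-- def categorize_objects(objects):
--     """Categorize objects by type."""
--     names = [name for name, _ in GROUPS] + ["other"]
--     labels = [_category(obj) for obj in objects]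
--     return {name: [obj for obj, lab in zip(objects, labels) if lab == name]
--             for name in names}
-- ===== Notes on version B (the rewrite author's own statement) =====
-- stated objective: alternative
-- what changed: Replaces the single-pass if/elif ladder with dict mutation by a data-driven classifier over an ordered group table plus a per-category filter comprehension that builds each bucket independently.
import Mathlib
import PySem

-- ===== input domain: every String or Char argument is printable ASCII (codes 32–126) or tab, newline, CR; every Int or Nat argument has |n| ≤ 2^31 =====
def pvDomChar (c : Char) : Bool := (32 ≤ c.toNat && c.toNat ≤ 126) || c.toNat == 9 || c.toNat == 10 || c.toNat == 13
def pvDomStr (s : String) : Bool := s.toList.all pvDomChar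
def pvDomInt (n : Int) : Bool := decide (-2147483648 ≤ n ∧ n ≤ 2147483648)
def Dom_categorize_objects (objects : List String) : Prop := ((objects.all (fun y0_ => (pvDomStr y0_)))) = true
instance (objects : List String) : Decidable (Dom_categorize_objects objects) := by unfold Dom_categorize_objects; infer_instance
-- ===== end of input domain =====

-- B replaces A's one-pass if/elif ladder (mutating a pre-built dict) by a data-driven
-- first-matching-group classifier and a per-category filter; same exact result, no speed claim.

-- ===== PORT A =====
def utensil_keywords : List String := ["fork", "knife", "spoon", "spatula", "ladle", "whisk"]
def fruit_keywords : List String := ["apple", "banana", "orange", "lemon", "lime", "peach", "pear", "mango", "kiwi", "grape"]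
def vegetable_keywords : List String := ["carrot", "corn", "cucumber", "eggplant", "garlic", "onion", "pepper", "potato", "tomato", "broccoli"]
def container_keywords : List String := ["bowl", "cup", "mug", "plate", "pot", "pan", "pitcher", "jar", "bottle"]
def can_keywords : List String := ["can", "coke", "pepsi", "sprite", "fanta", "redbull", "7up"]
def cube_keywords : List String := ["cube"]

-- any(kw in s for kw in kws)
def pvAnyIn (kws : List String) (s : String) : Bool := kws.any (fun kw => PySem.Str.isIn kw s)

-- A's dict has fixed literal keys, so it is transliterated as a 7-tuple of buckets
-- mutated in A's if/elif order, rendered back as the association list at the end.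
def pvStateA : Type := List String × List String × List String × List String × List String × List String × List String

def pvStepA (c : pvStateA) (obj : String) : pvStateA :=
  match c with
  | (u, f, v, co, cn, cb, ot) =>
    let ol := PySem.Str.lower obj
    if pvAnyIn utensil_keywords ol then (u ++ [obj], f, v, co, cn, cb, ot)
    else if pvAnyIn fruit_keywords ol then (u, f ++ [obj], v, co, cn, cb, ot)
    else if pvAnyIn vegetable_keywords ol then (u, f, v ++ [obj], co, cn, cb, ot)
    else if pvAnyIn container_keywords ol then (u, f, v, co ++ [obj], cn, cb, ot)
    else if pvAnyIn can_keywords ol then (u, f, v, co, cn ++ [obj], cb, ot)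
    else if pvAnyIn cube_keywords ol then (u, f, v, co, cn, cb ++ [obj], ot)
    else (u, f, v, co, cn, cb, ot ++ [obj])

def categorize_objects (objects : List String) : List (String × List String) :=
  let c := objects.foldl pvStepA ([], [], [], [], [], [], [])
  [("utensils", c.1), ("fruits", c.2.1), ("vegetables", c.2.2.1), ("containers", c.2.2.2.1),
   ("cans", c.2.2.2.2.1), ("cubes", c.2.2.2.2.2.1), ("other", c.2.2.2.2.2.2)]

-- ===== PORT B =====
def pvGroups : List (String × List String) :=
  [("utensils", utensil_keywords), ("fruits", fruit_keywords), ("vegetables", vegetable_keywords),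
   ("containers", container_keywords), ("cans", can_keywords), ("cubes", cube_keywords)]

-- Source B's _category loop: first group whose keywords match, else "other"
def pvFirstGroup (ol : String) : List (String × List String) → String
  | [] => "other"
  | (name, kws) :: rest =>
    if kws.any (fun kw => PySem.Str.isIn kw ol) then name else pvFirstGroup ol rest

def pvCategory (obj : String) : String := pvFirstGroup (PySem.Str.lower obj) pvGroups

def categorize_objects_alt (objects : List String) : List (String × List String) :=
  let labels := objects.map pvCategory
  (pvGroups.map Prod.fst ++ ["other"]).map
    (fun name => (name, ((objects.zip labels).filter (fun p => p.2 == name)).map Prod.fst))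

-- ===== PRECONDITION & SPEC =====
def Spec_categorize_objects (objects : List String) (out : List (String × List String)) : Prop := out = categorize_objects_alt objects
instance (objects : List String) (out : List (String × List String)) : Decidable (Spec_categorize_objects objects out) := by unfold Spec_categorize_objects; infer_instance

-- ===== CLAIM (what is proved, stated in full; the proofs are below) =====
def Claim_equal_categorize_objects : Prop := ∀ (objects : List String), Dom_categorize_objects objects → Spec_categorize_objects objects (categorize_objects objects)

-- ===== LEMMAS AND PROOFS =====

def pvFilt (objects : List String) (name : String) : List String :=
  objects.filter (fun obj => pvCategory obj == name)

theorem pvFold_eq (objects : List String) :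
    ∀ (u f v co cn cb ot : List String),
      objects.foldl pvStepA (u, f, v, co, cn, cb, ot) =
        (u ++ pvFilt objects "utensils", f ++ pvFilt objects "fruits",
         v ++ pvFilt objects "vegetables", co ++ pvFilt objects "containers",
         cn ++ pvFilt objects "cans", cb ++ pvFilt objects "cubes",
         ot ++ pvFilt objects "other") := by
  induction objects with
  | nil => intro u f v co cn cb ot; simp [pvFilt]
  | cons o os ih =>
    intro u f v co cn cb ot
    have hcat : pvCategory o =
        (if pvAnyIn utensil_keywords (PySem.Str.lower o) then "utensils"
         else if pvAnyIn fruit_keywords (PySem.Str.lower o) then "fruits"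
         else if pvAnyIn vegetable_keywords (PySem.Str.lower o) then "vegetables"
         else if pvAnyIn container_keywords (PySem.Str.lower o) then "containers"
         else if pvAnyIn can_keywords (PySem.Str.lower o) then "cans"
         else if pvAnyIn cube_keywords (PySem.Str.lower o) then "cubes"
         else "other") := by
      simp [pvCategory, pvGroups, pvFirstGroup, pvAnyIn]
    by_cases h1 : pvAnyIn utensil_keywords (PySem.Str.lower o) <;>
      [skip; by_cases h2 : pvAnyIn fruit_keywords (PySem.Str.lower o)] <;>
      [skip; skip; by_cases h3 : pvAnyIn vegetable_keywords (PySem.Str.lower o)] <;>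
      [skip; skip; skip; by_cases h4 : pvAnyIn container_keywords (PySem.Str.lower o)] <;>
      [skip; skip; skip; skip; by_cases h5 : pvAnyIn can_keywords (PySem.Str.lower o)] <;>
      [skip; skip; skip; skip; skip; by_cases h6 : pvAnyIn cube_keywords (PySem.Str.lower o)] <;>
      simp_all [List.foldl_cons, pvStepA, pvFilt, List.filter_cons, hcat, ih]

theorem pvZipFilt (name : String) (objects : List String) :
    ((objects.zip (objects.map pvCategory)).filter (fun p => p.2 == name)).map Prod.fst =
      pvFilt objects name := by
  induction objects with
  | nil => simp [pvFilt]
  | cons o os ih =>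
    by_cases h : pvCategory o == name <;> simp [pvFilt, List.filter_cons, h, ih]

theorem categorize_objects_eq_alt (objects : List String) :
    categorize_objects objects = categorize_objects_alt objects := by
  simp [categorize_objects, categorize_objects_alt, pvGroups, pvFold_eq, pvZipFilt]

-- ===== VERDICT (by name: the statement is the Claim_ definition above) =====
theorem categorize_objects_spec : Claim_equal_categorize_objects := by
  intro objects _
  exact categorize_objects_eq_alt objects
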